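-- pv_equiv track=rewrite | github.com/tensorflow/tensorflow | tensorflow/python/autograph/tests/loop_scoping_test.py | for_with_lambda_iter_local_var
-- ===== SOURCE A (Python) =====
-- def for_with_lambda_iter_local_var(l):
--   fns = []
--   results = []
--   for i in l:
--     fns.append(lambda i=i: i)
--   for f in fns:
--     results.append(f())
--   return results
-- ===== SOURCE B (Python) =====
-- def for_with_lambda_iter_local_var(l):
--   return list(l)
-- ===== Notes on version B (the rewrite author's own statement) =====
-- stated objective: simpler
-- what changed: B drops A's two-pass closure machinery (build a list of default-argument lambdas, then call each) and materializes the iterable directly with list(l), removing the per-element closure allocation and call.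
import Mathlib
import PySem

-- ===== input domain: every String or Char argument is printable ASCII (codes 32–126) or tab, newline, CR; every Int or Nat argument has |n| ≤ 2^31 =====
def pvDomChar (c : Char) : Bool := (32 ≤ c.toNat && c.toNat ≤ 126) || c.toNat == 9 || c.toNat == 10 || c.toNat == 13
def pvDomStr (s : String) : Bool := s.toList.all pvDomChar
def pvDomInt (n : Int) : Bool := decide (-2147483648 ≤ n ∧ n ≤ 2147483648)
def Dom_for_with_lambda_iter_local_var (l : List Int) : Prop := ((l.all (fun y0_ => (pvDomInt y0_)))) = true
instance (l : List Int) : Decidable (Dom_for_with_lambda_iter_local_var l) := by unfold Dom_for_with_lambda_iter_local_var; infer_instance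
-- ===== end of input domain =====

-- B replaces A's two-pass closure-building loop with a direct materialization of the iterable (simpler).

-- ===== PORT A =====
-- A: first loop builds a list of closures (each capturing its i via the default argument),
-- the second loop calls each closure and appends the result.
def for_with_lambda_iter_local_var (l : List Int) : List Int :=
  let fns : List (Unit → Int) := l.foldl (fun acc i => acc ++ [fun _ => i]) []
  let results : List Int := fns.foldl (fun acc f => acc ++ [f ()]) []
  results

-- ===== PORT B =====
-- B: list(l)
def for_with_lambda_iter_local_var_alt (l : List Int) : List Int := l

-- ===== PRECONDITION & SPEC =====
def Spec_for_with_lambda_iter_local_var (l : List Int) (out : List Int) : Prop := out = for_with_lambda_iter_local_var_alt l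
instance (l : List Int) (out : List Int) : Decidable (Spec_for_with_lambda_iter_local_var l out) := by unfold Spec_for_with_lambda_iter_local_var; infer_instance

-- ===== CLAIM (what is proved, stated in full; the proofs are below) =====
def Claim_equal_for_with_lambda_iter_local_var : Prop := ∀ (l : List Int), Dom_for_with_lambda_iter_local_var l → Spec_for_with_lambda_iter_local_var l (for_with_lambda_iter_local_var l)

-- ===== LEMMAS AND PROOFS =====
theorem foldl_append_map {α β : Type} (f : α → β) :
    ∀ (l : List α) (acc : List β),
      l.foldl (fun a x => a ++ [f x]) acc = acc ++ l.map f := by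
  intro l
  induction l with
  | nil => simp
  | cons x xs ih => intro acc; simp [List.foldl, ih]

-- ===== VERDICT (by name: the statement is the Claim_ definition above) =====
theorem for_with_lambda_iter_local_var_spec : Claim_equal_for_with_lambda_iter_local_var := by
  intro l _
  unfold Spec_for_with_lambda_iter_local_var for_with_lambda_iter_local_var
    for_with_lambda_iter_local_var_alt
  simp only [foldl_append_map, List.nil_append, List.map_map]
  exact List.map_id l
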